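-- pv_equiv track=rewrite | github.com/parshwa15/Arihant_Agency | app.py | _detect_dealer_name_col
-- ===== SOURCE A (Python) =====
-- from typing import Dict, Any, List, Optional
--
-- def _detect_dealer_name_col(headers: List[str]) -> Optional[str]:
--     low = {h.lower(): h for h in headers}
--     # exact “dealer name”
--     for k, v in low.items():
--         cleaned = k.replace("_"," ").replace("-"," ").strip()
--         if cleaned == "dealer name":
--             return v
--     # contains both words
--     for k, v in low.items():
--         if "dealer" in k and "name" in k:
--             return v
--     # party name fallback
--     for k, v in low.items():
--         if "party" in k and "name" in k:
--             return v
--     return None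
-- ===== SOURCE B (Python) =====
-- from typing import List, Optional
--
-- def _detect_dealer_name_col(headers: List[str]) -> Optional[str]:
--     low = {h.lower(): h for h in headers}
--     best = None  # (tier, original header); lower tier = higher priority
--     for k, v in low.items():
--         if k.replace("_", " ").replace("-", " ").strip() == "dealer name":
--             tier = 1
--         elif "dealer" in k and "name" in k:
--             tier = 2
--         elif "party" in k and "name" in k:
--             tier = 3
--         else:
--             continue
--         if best is None or tier < best[0]:
--             best = (tier, v)
--     return best[1] if best is not None else None
-- ===== Notes on version B (the rewrite author's own statement) =====
-- stated objective: alternative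
-- what changed: Replaces A's three sequential scans over the dict with a single pass that assigns each key a priority tier (exact match / dealer+name / party+name) and keeps the first item of the lowest tier seen.
import Mathlib
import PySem

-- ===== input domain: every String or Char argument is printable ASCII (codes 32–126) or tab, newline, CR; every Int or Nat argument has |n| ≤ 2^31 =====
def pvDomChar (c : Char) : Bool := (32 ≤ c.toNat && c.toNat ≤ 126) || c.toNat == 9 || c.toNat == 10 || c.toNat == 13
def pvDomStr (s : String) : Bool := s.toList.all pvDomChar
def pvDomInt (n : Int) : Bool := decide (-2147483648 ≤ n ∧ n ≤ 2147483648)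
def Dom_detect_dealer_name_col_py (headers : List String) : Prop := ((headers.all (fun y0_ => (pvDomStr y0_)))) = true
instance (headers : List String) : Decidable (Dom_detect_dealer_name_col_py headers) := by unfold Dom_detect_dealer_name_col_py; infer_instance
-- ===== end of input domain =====

-- B replaces A's three sequential scans with one priority-tier tracking pass (objective: alternative).

-- shared helper: both Pythons build the same `low = {h.lower(): h for h in headers}`
def pvLowerDict (headers : List String) : PySem.Dict String String :=
  headers.foldl (fun d h => d.insert (PySem.Str.lower h) h) PySem.Dict.empty

-- ===== PORT A =====
def detect_dealer_name_col_py (headers : List String) : Option String :=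
  let low := pvLowerDict headers
  match low.items.find? (fun kv =>
      PySem.Str.strip (PySem.Str.replace (PySem.Str.replace kv.1 "_" " ") "-" " ") == "dealer name") with
  | some kv => some kv.2
  | none =>
    match low.items.find? (fun kv => PySem.Str.isIn "dealer" kv.1 && PySem.Str.isIn "name" kv.1) with
    | some kv => some kv.2
    | none =>
      match low.items.find? (fun kv => PySem.Str.isIn "party" kv.1 && PySem.Str.isIn "name" kv.1) with
      | some kv => some kv.2
      | none => none

-- ===== PORT B =====
def pvTier (k : String) : Option Nat :=
  if PySem.Str.strip (PySem.Str.replace (PySem.Str.replace k "_" " ") "-" " ") == "dealer name" then some 1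
  else if PySem.Str.isIn "dealer" k && PySem.Str.isIn "name" k then some 2
  else if PySem.Str.isIn "party" k && PySem.Str.isIn "name" k then some 3
  else none

def pvStep (best : Option (Nat × String)) (kv : String × String) : Option (Nat × String) :=
  match pvTier kv.1 with
  | none => best
  | some t =>
    match best with
    | none => some (t, kv.2)
    | some b => if t < b.1 then some (t, kv.2) else best

def detect_dealer_name_col_py_alt (headers : List String) : Option String :=
  ((pvLowerDict headers).items.foldl pvStep none).map (·.2)

-- ===== PRECONDITION & SPEC =====
def Spec_detect_dealer_name_col_py (headers : List String) (out : Option String) : Prop := out = detect_dealer_name_col_py_alt headers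
instance (headers : List String) (out : Option String) : Decidable (Spec_detect_dealer_name_col_py headers out) := by unfold Spec_detect_dealer_name_col_py; infer_instance

-- ===== CLAIM (what is proved, stated in full; the proofs are below) =====
def Claim_equal_detect_dealer_name_col_py : Prop := ∀ (headers : List String), Dom_detect_dealer_name_col_py headers → Spec_detect_dealer_name_col_py headers (detect_dealer_name_col_py headers)

-- ===== LEMMAS AND PROOFS =====

-- A's three conditions, on a key
def pvC1 (k : String) : Bool :=
  PySem.Str.strip (PySem.Str.replace (PySem.Str.replace k "_" " ") "-" " ") == "dealer name"
def pvC2 (k : String) : Bool := PySem.Str.isIn "dealer" k && PySem.Str.isIn "name" k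
def pvC3 (k : String) : Bool := PySem.Str.isIn "party" k && PySem.Str.isIn "name" k

theorem pvTier_cases (k : String) :
    pvTier k = (if pvC1 k then some 1 else if pvC2 k then some 2 else if pvC3 k then some 3 else none) := by
  simp [pvTier, pvC1, pvC2, pvC3]

theorem pvTier_pos {k : String} {t : Nat} (h : pvTier k = some t) : 1 ≤ t := by
  rw [pvTier_cases] at h
  split_ifs at h <;> simp_all <;> omega

theorem foldl_step_one (l : List (String × String)) (v : String) :
    l.foldl pvStep (some (1, v)) = some (1, v) := by
  induction l with
  | nil => rfl
  | cons kv l ih =>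
    have hstep : pvStep (some (1, v)) kv = some (1, v) := by
      unfold pvStep
      cases h : pvTier kv.1 with
      | none => rfl
      | some t => have := pvTier_pos h; simp; omega
    simp [List.foldl_cons, hstep, ih]

theorem foldl_step_two (l : List (String × String)) (v : String) :
    l.foldl pvStep (some (2, v)) =
      (match l.find? (fun kv => pvTier kv.1 == some 1) with
       | some q => some (1, q.2)
       | none => some (2, v)) := by
  induction l generalizing v with
  | nil => rfl
  | cons kv l ih =>
    rw [List.foldl_cons, List.find?_cons]
    cases h : pvTier kv.1 with
    | none => simp [pvStep, h, ih]
    | some t =>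
      have h1 := pvTier_pos h
      by_cases ht : t = 1
      · subst ht
        simp [pvStep, h, foldl_step_one]
      · have hb1 : (t == 1) = false := by simp [ht]
        have : ¬ t < 2 := by omega
        simp [pvStep, h, this, hb1, ih]

theorem foldl_step_three (l : List (String × String)) (v : String) :
    l.foldl pvStep (some (3, v)) =
      (match l.find? (fun kv => pvTier kv.1 == some 1) with
       | some q => some (1, q.2)
       | none =>
         match l.find? (fun kv => pvTier kv.1 == some 2) with
         | some q => some (2, q.2)
         | none => some (3, v)) := by
  induction l generalizing v with
  | nil => rfl
  | cons kv l ih =>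
    rw [List.foldl_cons, List.find?_cons, List.find?_cons]
    cases h : pvTier kv.1 with
    | none => simp [pvStep, h, ih]
    | some t =>
      have h1 := pvTier_pos h
      by_cases ht1 : t = 1
      · subst ht1; simp [pvStep, h, foldl_step_one]
      · by_cases ht2 : t = 2
        · subst ht2
          simp [pvStep, h, foldl_step_two]
        · have hb1 : (t == 1) = false := by simp [ht1]
          have hb2 : (t == 2) = false := by simp [ht2]
          have : ¬ t < 3 := by omega
          simp [pvStep, h, this, hb1, hb2, ih]

theorem foldl_step_none (l : List (String × String)) :
    l.foldl pvStep none =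
      (match l.find? (fun kv => pvTier kv.1 == some 1) with
       | some q => some (1, q.2)
       | none =>
         match l.find? (fun kv => pvTier kv.1 == some 2) with
         | some q => some (2, q.2)
         | none =>
           match l.find? (fun kv => pvTier kv.1 == some 3) with
           | some q => some (3, q.2)
           | none => none) := by
  induction l with
  | nil => rfl
  | cons kv l ih =>
    rw [List.foldl_cons, List.find?_cons, List.find?_cons, List.find?_cons]
    cases h : pvTier kv.1 with
    | none =>
      have h1 : (pvTier kv.1 == some 1) = false := by simp [h]
      have h2 : (pvTier kv.1 == some 2) = false := by simp [h]
      have h3 : (pvTier kv.1 == some 3) = false := by simp [h]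
      simp [pvStep, h, ih]
    | some t =>
      have h1 := pvTier_pos h
      by_cases ht1 : t = 1
      · subst ht1; simp [pvStep, h, foldl_step_one]
      · by_cases ht2 : t = 2
        · subst ht2; simp [pvStep, h, foldl_step_two]
        · by_cases ht3 : t = 3
          · subst ht3; simp [pvStep, h, foldl_step_three]
          · rw [pvTier_cases] at h
            split_ifs at h <;> simp_all

theorem find?_ext {α : Type} (p q : α → Bool) (l : List α)
    (h : ∀ x ∈ l, p x = q x) : l.find? p = l.find? q := by
  induction l with
  | nil => rfl
  | cons a l ih =>
    rw [List.find?_cons, List.find?_cons, h a (by simp)]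
    split
    · rfl
    · exact ih (fun x hx => h x (by simp [hx]))

-- the core equality, on an arbitrary items list
theorem scan_eq (l : List (String × String)) :
    (match l.find? (fun kv => pvC1 kv.1) with
     | some kv => some kv.2
     | none =>
       match l.find? (fun kv => pvC2 kv.1) with
       | some kv => some kv.2
       | none =>
         match l.find? (fun kv => pvC3 kv.1) with
         | some kv => some kv.2
         | none => none) = (l.foldl pvStep none).map (·.2) := by
  rw [foldl_step_none]
  have e1 : l.find? (fun kv => pvTier kv.1 == some 1) = l.find? (fun kv => pvC1 kv.1) := by
    apply find?_ext
    intro kv _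
    rw [pvTier_cases]
    by_cases h : pvC1 kv.1 <;> simp [h] <;> split_ifs <;> simp
  rw [e1]
  cases hf1 : l.find? (fun kv => pvC1 kv.1) with
  | some kv => simp
  | none =>
    have hn1 : ∀ x ∈ l, pvC1 x.1 = false := by
      intro x hx
      have := List.find?_eq_none.mp hf1 x hx
      simpa using this
    have e2 : l.find? (fun kv => pvTier kv.1 == some 2) = l.find? (fun kv => pvC2 kv.1) := by
      apply find?_ext
      intro kv hkv
      rw [pvTier_cases, hn1 kv hkv]
      by_cases h : pvC2 kv.1 <;> simp [h] <;> split_ifs <;> simp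
    rw [e2]
    cases hf2 : l.find? (fun kv => pvC2 kv.1) with
    | some kv => simp
    | none =>
      have hn2 : ∀ x ∈ l, pvC2 x.1 = false := by
        intro x hx
        have := List.find?_eq_none.mp hf2 x hx
        simpa using this
      have e3 : l.find? (fun kv => pvTier kv.1 == some 3) = l.find? (fun kv => pvC3 kv.1) := by
        apply find?_ext
        intro kv hkv
        rw [pvTier_cases, hn1 kv hkv, hn2 kv hkv]
        by_cases h : pvC3 kv.1 <;> simp [h]
      rw [e3]
      cases hf3 : l.find? (fun kv => pvC3 kv.1) with
      | some kv => simp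
      | none => simp

-- ===== VERDICT (by name: the statement is the Claim_ definition above) =====
theorem detect_dealer_name_col_py_spec : Claim_equal_detect_dealer_name_col_py := by
  intro headers _
  unfold Spec_detect_dealer_name_col_py detect_dealer_name_col_py detect_dealer_name_col_py_alt
  exact scan_eq ((pvLowerDict headers).items)
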